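-- pv_equiv track=rewrite | github.com/Southpaw-TACTIC/TACTIC | src/pyasm/biz/pipeline.py | create_pipeline_xml
-- ===== SOURCE A (Python) =====
-- def create_pipeline_xml(statuses, process_types=[], process_xpos=[], process_ypos=[]):
--     '''create regular pipeline with process_types, xpos, ypos or plain task status pipeline'''
--     if not statuses:
--         statuses = []
--
--     xml = []
--
--     xml.append('''<pipeline>''')
--
--     if process_types:
--
--         for i, status in enumerate(statuses):
--
--             if status == '':
--                 continue
--
--             process_type = process_types[i]
--
--             if len(process_xpos) > i:
--                 xpos = process_xpos[i]
--             else: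
--                 xpos = None
--             if len(process_ypos) > i:
--                 ypos = process_ypos[i]
--             else:
--                 ypos = None
--
--             if xpos and ypos:
--                 xml.append('''  <process name="%s" type="%s" xpos="%s" ypos="%s"/>''' % (status, process_type, xpos, ypos))
--             else:
--                 xml.append('''  <process name="%s" type="%s"/>''' % (status, process_type))
--     else:
--         for status in statuses:
--             if status == '':
--                 continue
--             xml.append('''  <process name="%s"/>''' % status)
--
--
--
--     last_status = None
--     for i, status in enumerate(statuses):
--         if status == '':
--             continue
--
--         if i == 0 or last_status == None:
--             last_status = status
--             continue
--
--
--         xml.append('''  <connect from="%s" to="%s"/>''' % (last_status,status))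
--         last_status = status
--
--     xml.append('''</pipeline>''')
--     return "\n".join(xml)
-- ===== SOURCE B (Python) =====
-- def create_pipeline_xml(statuses, process_types=[], process_xpos=[], process_ypos=[]):
--     '''single fused traversal in REVERSE order: one loop builds both sections at
--     once, carrying the next non-empty status instead of A's last_status machine'''
--     def fmt(i, s):
--         if process_types:
--             pt = process_types[i]
--             xpos = process_xpos[i] if len(process_xpos) > i else None
--             ypos = process_ypos[i] if len(process_ypos) > i else None
--             if xpos and ypos:
--                 return '  <process name="%s" type="%s" xpos="%s" ypos="%s"/>' % (s, pt, xpos, ypos)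
--             return '  <process name="%s" type="%s"/>' % (s, pt)
--         return '  <process name="%s"/>' % s
--
--     rprocs, rconns, nxt = [], [], None
--     for i, s in reversed(list(enumerate(statuses or []))):
--         if s == '':
--             continue
--         rprocs.append(fmt(i, s))
--         if nxt is not None:
--             rconns.append('  <connect from="%s" to="%s"/>' % (s, nxt))
--         nxt = s
--     return "\n".join(['<pipeline>'] + rprocs[::-1] + rconns[::-1] + ['</pipeline>'])
-- ===== Notes on version B (the rewrite author's own statement) =====
-- stated objective: alternative
-- what changed: A's two forward loops (an append-or-skip process loop, then a last_status/first-index state machine for connects) are replaced by ONE fused traversal in reverse order that builds both sections simultaneously, carrying the next non-empty status so each connect is emitted the moment its source is seen, with no first-element special case.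
import Mathlib
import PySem

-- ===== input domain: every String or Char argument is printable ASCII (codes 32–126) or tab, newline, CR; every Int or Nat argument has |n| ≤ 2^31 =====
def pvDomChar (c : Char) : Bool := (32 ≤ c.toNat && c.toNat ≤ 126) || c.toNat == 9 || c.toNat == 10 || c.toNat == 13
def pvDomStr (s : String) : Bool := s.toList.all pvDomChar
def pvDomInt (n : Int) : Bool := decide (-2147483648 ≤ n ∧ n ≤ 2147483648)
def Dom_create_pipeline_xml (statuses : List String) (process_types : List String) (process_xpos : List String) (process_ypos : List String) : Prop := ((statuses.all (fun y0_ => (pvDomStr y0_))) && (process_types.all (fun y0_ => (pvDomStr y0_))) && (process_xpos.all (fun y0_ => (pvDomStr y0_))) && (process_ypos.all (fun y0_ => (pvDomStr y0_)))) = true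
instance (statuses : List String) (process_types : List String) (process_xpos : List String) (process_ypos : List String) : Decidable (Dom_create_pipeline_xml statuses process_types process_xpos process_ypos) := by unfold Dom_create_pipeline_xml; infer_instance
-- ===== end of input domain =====

-- B replaces A's two forward loops by ONE fused reverse traversal that builds both
-- the process and the connect sections at once, carrying the next non-empty status
-- (objective: alternative; same cost).

-- shared literal formatting helpers (identical string templates in both Pythons)
def pvLine1 (s : String) : String := "  <process name=\"" ++ s ++ "\"/>"
def pvLine2 (s t : String) : String := "  <process name=\"" ++ s ++ "\" type=\"" ++ t ++ "\"/>"
def pvLine4 (s t x y : String) : String :=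
  "  <process name=\"" ++ s ++ "\" type=\"" ++ t ++ "\" xpos=\"" ++ x ++ "\" ypos=\"" ++ y ++ "\"/>"
def pvConn (a b : String) : String := "  <connect from=\"" ++ a ++ "\" to=\"" ++ b ++ "\"/>"
-- Python truthiness of an Optional[str]
def pvTruthy : Option String → Bool
  | some s => s ≠ ""
  | none => false

-- ===== PORT A =====
-- the body of A's first loop for one (i, status) with status ≠ ''
-- (process_types[i] is read with default "": Python raises IndexError exactly on
-- the inputs Pre_create_pipeline_xml excludes)
def pvA_procStep (pt px py : List String) (xml : List String) (p : Int × String) : List String :=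
  if p.2 = "" then xml
  else
    let process_type := PySem.List.pyGetD pt p.1 ""
    let xpos : Option String := if PySem.List.len px > p.1 then some (PySem.List.pyGetD px p.1 "") else none
    let ypos : Option String := if PySem.List.len py > p.1 then some (PySem.List.pyGetD py p.1 "") else none
    if pvTruthy xpos && pvTruthy ypos then
      xml ++ [pvLine4 p.2 process_type (xpos.getD "") (ypos.getD "")]
    else
      xml ++ [pvLine2 p.2 process_type]

-- A's last_status loop body: state = (last_status, xml)
def pvA_connStep (st : Option String × List String) (p : Int × String) : Option String × List String :=
  if p.2 = "" then st
  else if p.1 = 0 ∨ st.1 = none then (some p.2, st.2)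
  else (some p.2, st.2 ++ [pvConn (st.1.getD "") p.2])

def create_pipeline_xml (statuses : List String) (process_types : List String) (process_xpos : List String) (process_ypos : List String) : String :=
  let xml : List String := ["<pipeline>"]
  let xml : List String :=
    if process_types ≠ [] then
      (PySem.List.enumerate statuses 0).foldl (pvA_procStep process_types process_xpos process_ypos) xml
    else
      statuses.foldl (fun xml s => if s = "" then xml else xml ++ [pvLine1 s]) xml
  let st := (PySem.List.enumerate statuses 0).foldl pvA_connStep ((none : Option String), xml)
  PySem.Str.join "\n" (st.2 ++ ["</pipeline>"])

-- ===== PORT B =====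
-- B's fmt helper: branches on process_types per element, exactly as in Source B
-- (process_types[i] read with default "": raises in Python exactly outside Pre_)
def pvB_fmt (pt px py : List String) (i : Int) (s : String) : String :=
  if pt ≠ [] then
    let t := PySem.List.pyGetD pt i ""
    let xpos : Option String := if PySem.List.len px > i then some (PySem.List.pyGetD px i "") else none
    let ypos : Option String := if PySem.List.len py > i then some (PySem.List.pyGetD py i "") else none
    if pvTruthy xpos && pvTruthy ypos then
      pvLine4 s t (xpos.getD "") (ypos.getD "")
    else
      pvLine2 s t
  else pvLine1 s

-- B's fused loop body: state = (nxt, rprocs, rconns)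
def pvB_step (pt px py : List String) (st : Option String × List String × List String)
    (p : Int × String) : Option String × List String × List String :=
  if p.2 = "" then st
  else
    (some p.2, st.2.1 ++ [pvB_fmt pt px py p.1 p.2],
      match st.1 with
      | none => st.2.2
      | some t => st.2.2 ++ [pvConn p.2 t])

def create_pipeline_xml_alt (statuses : List String) (process_types : List String) (process_xpos : List String) (process_ypos : List String) : String :=
  let st := (PySem.List.enumerate statuses 0).reverse.foldl
      (pvB_step process_types process_xpos process_ypos)
      ((none : Option String), ([] : List String), ([] : List String))
  PySem.Str.join "\n" (["<pipeline>"] ++ st.2.1.reverse ++ st.2.2.reverse ++ ["</pipeline>"])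

-- ===== PRECONDITION & SPEC =====
-- Pre_ excludes exactly the inputs where Python A raises IndexError: process_types
-- non-empty but lacking an entry at the index of some non-empty status.
def Pre_create_pipeline_xml (statuses : List String) (process_types : List String) (process_xpos : List String) (process_ypos : List String) : Prop :=
  process_types ≠ [] → ∀ i : Fin statuses.length, statuses[i] ≠ "" → (i : Nat) < process_types.length
instance (statuses : List String) (process_types : List String) (process_xpos : List String) (process_ypos : List String) : Decidable (Pre_create_pipeline_xml statuses process_types process_xpos process_ypos) := by unfold Pre_create_pipeline_xml; infer_instance
def pvWitness_create_pipeline_xml : List String × List String × List String × List String :=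
  (["a", "", "b"], ["t1", "t2", "t3"], ["1", "2"], ["3", "4", "5"])

def Spec_create_pipeline_xml (statuses : List String) (process_types : List String) (process_xpos : List String) (process_ypos : List String) (out : String) : Prop := out = create_pipeline_xml_alt statuses process_types process_xpos process_ypos
instance (statuses : List String) (process_types : List String) (process_xpos : List String) (process_ypos : List String) (out : String) : Decidable (Spec_create_pipeline_xml statuses process_types process_xpos process_ypos out) := by unfold Spec_create_pipeline_xml; infer_instance

-- ===== CLAIM (what is proved, stated in full; the proofs are below) =====
def Claim_equal_create_pipeline_xml : Prop := ∀ (statuses : List String) (process_types : List String) (process_xpos : List String) (process_ypos : List String), Dom_create_pipeline_xml statuses process_types process_xpos process_ypos → Pre_create_pipeline_xml statuses process_types process_xpos process_ypos → Spec_create_pipeline_xml statuses process_types process_xpos process_ypos (create_pipeline_xml statuses process_types process_xpos process_ypos)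

-- ===== LEMMAS AND PROOFS =====

-- "next non-empty status" seen by B below the current element
def pvHead : List (Int × String) → Option String → Option String
  | [], n0 => n0
  | a :: _, _ => some a.2

-- the connect lines B emits for a filtered tail, in output order
def pvConns : List (Int × String) → Option String → List String
  | [], _ => []
  | a :: xs, n0 =>
    match pvHead xs n0 with
    | none => pvConns xs n0
    | some t => pvConn a.2 t :: pvConns xs n0

def pvPairs (ys : List String) : List String :=
  (ys.zip ys.tail).map (fun q => pvConn q.1 q.2)

-- branch-order bridge: A appends inside each branch, the line can be selected first
theorem pv_ite_append (c : Prop) [Decidable c] (acc rest : List String) (u v : String) :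
    (if c then acc ++ [u] else acc ++ [v]) ++ rest = acc ++ ((if c then u else v) :: rest) := by
  split <;> simp

-- A's first loop (typed case) is filter-then-map with pvB_fmt
theorem pvA_proc_eq (pt px py : List String) (hpt : pt ≠ []) (l : List (Int × String)) (acc : List String) :
    l.foldl (pvA_procStep pt px py) acc
      = acc ++ (l.filter (fun p => p.2 ≠ "")).map (fun p => pvB_fmt pt px py p.1 p.2) := by
  induction l generalizing acc with
  | nil => simp
  | cons x xs ih =>
    by_cases hx : x.2 = ""
    · simp [pvA_procStep, hx, ih]
    · rw [List.filter_cons_of_pos (by simpa using hx)]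
      simp only [List.foldl_cons, List.map_cons]
      rw [ih]
      simp only [pvA_procStep, pvB_fmt, if_neg hx, if_pos hpt]
      apply pv_ite_append

theorem pvA_plain_eq (l : List String) (acc : List String) :
    l.foldl (fun xml s => if s = "" then xml else xml ++ [pvLine1 s]) acc
      = acc ++ (l.filter (fun s => s ≠ "")).map pvLine1 := by
  induction l generalizing acc with
  | nil => simp
  | cons x xs ih =>
    by_cases hx : x = "" <;> simp [hx, ih]

-- snd of the filtered enumeration is the filtered list
theorem pv_filter_enum_snd (xs : List String) (s : Int) :
    ((PySem.List.enumerate xs s).filter (fun p => p.2 ≠ "")).map (fun p => p.2)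
      = xs.filter (fun x => x ≠ "") := by
  induction xs generalizing s with
  | nil => simp [PySem.List.enumerate_nil]
  | cons x xs ih =>
    by_cases hx : x = "" <;>
      · simp [PySem.List.enumerate_cons, hx]
        simpa using ih (s + 1)

-- A's last_status loop, characterised: with last = some l at a positive index it
-- emits the adjacent pairs of l :: (remaining non-empty statuses); with last = none
-- at a nonnegative index, those of the remaining non-empty statuses.
theorem pvA_conn_some (xs : List String) (k : Int) (hk : 1 ≤ k) (l : String) (acc : List String) :
    ((PySem.List.enumerate xs k).foldl pvA_connStep (some l, acc)).2
      = acc ++ pvPairs (l :: xs.filter (fun x => x ≠ "")) := by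
  induction xs generalizing k l acc with
  | nil => simp [PySem.List.enumerate_nil, pvPairs]
  | cons x xs ih =>
    by_cases hx : x = ""
    · simp [PySem.List.enumerate_cons, pvA_connStep, hx, ih (k + 1) (by omega) l acc]
    · have hstep : pvA_connStep (some l, acc) (k, x) = (some x, acc ++ [pvConn l x]) := by
        simp [pvA_connStep, hx, show ¬(k = 0) from by omega]
      simp only [PySem.List.enumerate_cons, List.foldl_cons, hstep]
      rw [ih (k + 1) (by omega) x (acc ++ [pvConn l x])]
      simp [hx, pvPairs]

theorem pvA_conn_none (xs : List String) (k : Int) (hk : 0 ≤ k) (acc : List String) :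
    ((PySem.List.enumerate xs k).foldl pvA_connStep ((none : Option String), acc)).2
      = acc ++ pvPairs (xs.filter (fun x => x ≠ "")) := by
  induction xs generalizing k acc with
  | nil => simp [PySem.List.enumerate_nil, pvPairs]
  | cons x xs ih =>
    by_cases hx : x = ""
    · simp [PySem.List.enumerate_cons, pvA_connStep, hx, ih (k + 1) (by omega) acc]
    · have hstep : pvA_connStep (none, acc) (k, x) = (some x, acc) := by
        simp [pvA_connStep, hx]
      simp only [PySem.List.enumerate_cons, List.foldl_cons, hstep]
      rw [pvA_conn_some xs (k + 1) (by omega) x acc]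
      simp [hx]

-- B's fused reverse loop, characterised on the filtered list
theorem pvB_loop (pt px py : List String) (l : List (Int × String))
    (n0 : Option String) (rp0 rc0 : List String) :
    l.reverse.foldl (pvB_step pt px py) (n0, rp0, rc0)
      = (pvHead (l.filter (fun p => p.2 ≠ "")) n0,
         rp0 ++ ((l.filter (fun p => p.2 ≠ "")).map (fun p => pvB_fmt pt px py p.1 p.2)).reverse,
         rc0 ++ (pvConns (l.filter (fun p => p.2 ≠ "")) n0).reverse) := by
  induction l with
  | nil => simp [pvHead, pvConns]
  | cons a xs ih =>
    have hsplit : (a :: xs).reverse.foldl (pvB_step pt px py) (n0, rp0, rc0)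
        = pvB_step pt px py (xs.reverse.foldl (pvB_step pt px py) (n0, rp0, rc0)) a := by
      simp [List.foldl_append]
    rw [hsplit, ih]
    by_cases ha : a.2 = ""
    · simp [pvB_step, ha]
    · rw [List.filter_cons_of_pos (by simpa using ha)]
      cases h : pvHead (xs.filter (fun p => p.2 ≠ "")) n0 with
      | none =>
        rw [show pvConns (a :: xs.filter (fun p => p.2 ≠ "")) n0
            = pvConns (xs.filter (fun p => p.2 ≠ "")) n0 from by rw [pvConns, h]]
        simp [pvB_step, ha, pvHead]
      | some t =>
        rw [show pvConns (a :: xs.filter (fun p => p.2 ≠ "")) n0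
            = pvConn a.2 t :: pvConns (xs.filter (fun p => p.2 ≠ "")) n0 from by rw [pvConns, h]]
        simp [pvB_step, ha, pvHead]

-- B's connects on the filtered list with no successor = adjacent pairs of the statuses
theorem pvConns_none_eq_pairs (l : List (Int × String)) :
    pvConns l none = pvPairs (l.map (fun p => p.2)) := by
  induction l with
  | nil => simp [pvConns, pvPairs]
  | cons a xs ih =>
    cases xs with
    | nil => simp [pvConns, pvHead, pvPairs]
    | cons b ys => simpa [pvConns, pvHead, pvPairs] using ih

-- ===== VERDICT (by name: the statement is the Claim_ definition above) =====
theorem create_pipeline_xml_spec : Claim_equal_create_pipeline_xml := by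
  intro statuses pt px py _ _
  unfold Spec_create_pipeline_xml
  simp only [create_pipeline_xml, create_pipeline_xml_alt]
  rw [pvA_conn_none statuses 0 (by omega)]
  rw [pvB_loop]
  simp only [List.reverse_append, List.reverse_reverse]
  rw [pvConns_none_eq_pairs, pv_filter_enum_snd]
  by_cases hpt : pt = []
  · simp only [hpt, ne_eq, not_true_eq_false, if_false, pvA_plain_eq]
    rw [show ((PySem.List.enumerate statuses 0).filter (fun p => p.2 ≠ "")).map
        (fun p => pvB_fmt [] px py p.1 p.2)
      = (((PySem.List.enumerate statuses 0).filter (fun p => p.2 ≠ "")).map (fun p => p.2)).map pvLine1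
      from by simp [List.map_map, pvB_fmt]]
    rw [pv_filter_enum_snd]
    simp
  · simp only [ne_eq, hpt, not_false_eq_true, if_true, pvA_proc_eq pt px py hpt]
    simp
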